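-- pv_equiv track=rewrite | github.com/ohsen12/My_coding_test | 프로그래머스/0/181829. 이차원 배열 대각선 순회하기/이차원 배열 대각선 순회하기.py | solution
-- ===== SOURCE A (Python) =====
-- def solution(board, k):
--     n = len(board)
--     total = 0
--     for i in range(n):
--         for j in range(len(board[i])):
--             if i + j <= k:
--                 total += board[i][j]
--     return total
-- ===== SOURCE B (Python) =====
-- def solution(board, k):
--     n = len(board)
--     maxlen = 0
--     for r in board:
--         if len(r) > maxlen:
--             maxlen = len(r)
--     total = 0
--     for d in range(0, min(k, n + maxlen - 2) + 1):
--         for i in range(max(0, d - maxlen + 1), min(d, n - 1) + 1):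
--             j = d - i
--             if j < len(board[i]):
--                 total += board[i][j]
--     return total
-- ===== Notes on version B (the rewrite author's own statement) =====
-- stated objective: alternative
-- what changed: B visits the cells in anti-diagonal order (d = i+j from 0 to min(k, n+maxlen-2)), replacing A's row-major scan with its per-cell i+j<=k guard by per-diagonal index arithmetic plus a bounds check against each jagged row.
import Mathlib
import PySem

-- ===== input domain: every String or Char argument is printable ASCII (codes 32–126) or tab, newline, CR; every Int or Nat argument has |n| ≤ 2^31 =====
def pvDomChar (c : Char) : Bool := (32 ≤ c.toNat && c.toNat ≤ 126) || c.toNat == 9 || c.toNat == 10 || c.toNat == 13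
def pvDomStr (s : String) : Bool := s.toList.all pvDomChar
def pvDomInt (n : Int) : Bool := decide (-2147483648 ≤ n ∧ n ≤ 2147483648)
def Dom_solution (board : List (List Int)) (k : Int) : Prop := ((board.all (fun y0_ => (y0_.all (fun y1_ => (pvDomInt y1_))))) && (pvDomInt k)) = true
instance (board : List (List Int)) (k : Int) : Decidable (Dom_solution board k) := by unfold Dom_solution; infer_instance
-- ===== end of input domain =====

-- B sums the same cells in anti-diagonal order instead of row-major order; alternative traversal, same results.

-- ===== PORT A =====
def solution (board : List (List Int)) (k : Int) : Int :=
  let n : Int := board.length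
  (PySem.List.pyRange 0 n 1).foldl (fun total i =>
    (PySem.List.pyRange 0 ((PySem.List.pyGetD board i []).length : Int) 1).foldl (fun total j =>
      if i + j ≤ k then total + PySem.List.pyGetD (PySem.List.pyGetD board i []) j 0 else total)
      total) 0

-- ===== PORT B =====
def solution_alt (board : List (List Int)) (k : Int) : Int :=
  let n : Int := board.length
  let maxlen : Int := board.foldl (fun m r => if (r.length : Int) > m then (r.length : Int) else m) 0
  (PySem.List.pyRange 0 (min k (n + maxlen - 2) + 1) 1).foldl (fun total d =>
    (PySem.List.pyRange (max 0 (d - maxlen + 1)) (min d (n - 1) + 1) 1).foldl (fun total i =>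
      let j := d - i
      if j < ((PySem.List.pyGetD board i []).length : Int) then
        total + PySem.List.pyGetD (PySem.List.pyGetD board i []) j 0
      else total)
      total) 0

-- ===== PRECONDITION & SPEC =====
def Spec_solution (board : List (List Int)) (k : Int) (out : Int) : Prop := out = solution_alt board k
instance (board : List (List Int)) (k : Int) (out : Int) : Decidable (Spec_solution board k out) := by unfold Spec_solution; infer_instance

-- ===== CLAIM (what is proved, stated in full; the proofs are below) =====
def Claim_equal_solution : Prop := ∀ (board : List (List Int)) (k : Int), Dom_solution board k → Spec_solution board k (solution board k)

-- ===== LEMMAS AND PROOFS =====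

-- cell value board[i][j] and row length, as the ports read them
def pvG (board : List (List Int)) (i j : Int) : Int :=
  PySem.List.pyGetD (PySem.List.pyGetD board i []) j 0
def pvL (board : List (List Int)) (i : Int) : Int :=
  ((PySem.List.pyGetD board i []).length : Int)

-- an 'if p then acc + g else acc' loop is init + a sum
lemma foldl_ite_add_sum (l : List Int) (p : Int → Prop) [DecidablePred p] (g : Int → Int) (a : Int) :
    l.foldl (fun acc x => if p x then acc + g x else acc) a
      = a + (l.map (fun x => if p x then g x else 0)).sum := by
  induction l generalizing a with
  | nil => simp
  | cons x t ih => simp only [List.foldl_cons, List.map_cons, List.sum_cons]; split <;> rw [ih] <;> ring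

-- sum of a map over pyRange is a Finset.Icc sum
lemma sum_map_pyRange (f : Int → Int) (a b : Int) :
    ((PySem.List.pyRange a b 1).map f).sum = ∑ x ∈ Finset.Icc a (b - 1), f x := by
  rw [← List.sum_toFinset _ (PySem.List.nodup_pyRange_one a b)]
  apply Finset.sum_congr _ (fun _ _ => rfl)
  ext x
  simp only [List.mem_toFinset, PySem.List.mem_pyRange_one, Finset.mem_Icc]
  omega

lemma sum_ite_filter (s : Finset Int) (p : Int → Prop) [DecidablePred p] (g : Int → Int) :
    (∑ x ∈ s, if p x then g x else 0) = ∑ x ∈ s.filter p, g x := by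
  rw [Finset.sum_filter]

-- generic: a fold whose body adds S x is init + sum
lemma foldl_eq_add_sum (l : List Int) (f : Int → Int → Int) (S : Int → Int) (a : Int)
    (h : ∀ acc x, x ∈ l → f acc x = acc + S x) : l.foldl f a = a + (l.map S).sum := by
  induction l generalizing a with
  | nil => simp
  | cons x t ih =>
    simp only [List.foldl_cons, List.map_cons, List.sum_cons]
    rw [h a x (by simp), ih _ (fun acc y hy => h acc y (by simp [hy]))]
    ring

-- the running-max-of-lengths loop bounds every row length
lemma le_foldl_len (l : List (List Int)) (a : Int) :
    a ≤ l.foldl (fun m r => if (r.length : Int) > m then (r.length : Int) else m) a ∧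
    ∀ r ∈ l, (r.length : Int) ≤ l.foldl (fun m r => if (r.length : Int) > m then (r.length : Int) else m) a := by
  induction l generalizing a with
  | nil => simp
  | cons x t ih =>
    simp only [List.foldl_cons, List.mem_cons]
    have ha : a ≤ (if (x.length : Int) > a then (x.length : Int) else a) := by split <;> omega
    have hx : (x.length : Int) ≤ (if (x.length : Int) > a then (x.length : Int) else a) := by
      split <;> omega
    rcases ih (if (x.length : Int) > a then (x.length : Int) else a) with ⟨h1, h2⟩
    refine ⟨le_trans ha h1, ?_⟩
    rintro r (rfl | hr)
    · exact le_trans hx h1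
    · exact h2 r hr

-- A as a Finset double sum (row-major)
lemma solution_eq_sum (board : List (List Int)) (k : Int) :
    solution board k
      = ∑ i ∈ Finset.Icc 0 ((board.length : Int) - 1),
          ∑ j ∈ Finset.Icc 0 (pvL board i - 1),
            if i + j ≤ k then pvG board i j else 0 := by
  have h1 : solution board k = 0 + ((PySem.List.pyRange 0 (board.length : Int) 1).map
      (fun i => ((PySem.List.pyRange 0 (pvL board i) 1).map
        (fun j => if i + j ≤ k then pvG board i j else 0)).sum)).sum :=
    foldl_eq_add_sum _ _ _ 0
      (fun acc i _ => foldl_ite_add_sum _ (fun j => i + j ≤ k) (fun j => pvG board i j) acc)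
  rw [h1, zero_add, sum_map_pyRange]
  exact Finset.sum_congr rfl (fun i _ => sum_map_pyRange _ 0 (pvL board i))

-- B as a Finset double sum (anti-diagonal)
lemma solution_alt_eq_sum (board : List (List Int)) (k : Int) :
    solution_alt board k
      = ∑ d ∈ Finset.Icc 0 (min k ((board.length : Int) +
            board.foldl (fun m r => if (r.length : Int) > m then (r.length : Int) else m) 0 - 2)),
          ∑ i ∈ Finset.Icc (max 0 (d - board.foldl (fun m r => if (r.length : Int) > m then (r.length : Int) else m) 0 + 1))
              (min d ((board.length : Int) - 1)),
            if d - i < pvL board i then pvG board i (d - i) else 0 := by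
  have h1 : solution_alt board k = 0 + ((PySem.List.pyRange 0
      (min k ((board.length : Int) +
        board.foldl (fun m r => if (r.length : Int) > m then (r.length : Int) else m) 0 - 2) + 1) 1).map
      (fun d => ((PySem.List.pyRange
          (max 0 (d - board.foldl (fun m r => if (r.length : Int) > m then (r.length : Int) else m) 0 + 1))
          (min d ((board.length : Int) - 1) + 1) 1).map
        (fun i => if d - i < pvL board i then pvG board i (d - i) else 0)).sum)).sum :=
    foldl_eq_add_sum _ _ _ 0
      (fun acc d _ => foldl_ite_add_sum _
        (fun i => d - i < pvL board i) (fun i => pvG board i (d - i)) acc)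
  rw [h1, zero_add, sum_map_pyRange]
  simp only [add_sub_cancel_right]
  exact Finset.sum_congr rfl (fun d _ => by rw [sum_map_pyRange]; simp only [add_sub_cancel_right])

-- the combinatorial core: row-major sum = anti-diagonal sum
lemma key_sum (board : List (List Int)) (k M : Int)
    (hMle : ∀ i : Int, 0 ≤ i → i < (board.length : Int) → pvL board i ≤ M) :
    (∑ i ∈ Finset.Icc 0 ((board.length : Int) - 1),
        ∑ j ∈ Finset.Icc 0 (pvL board i - 1), if i + j ≤ k then pvG board i j else 0)
      = ∑ d ∈ Finset.Icc 0 (min k ((board.length : Int) + M - 2)),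
          ∑ i ∈ Finset.Icc (max 0 (d - M + 1)) (min d ((board.length : Int) - 1)),
            if d - i < pvL board i then pvG board i (d - i) else 0 := by
  have hL0 : ∀ i : Int, 0 ≤ pvL board i := fun i => Int.natCast_nonneg _
  calc
    (∑ i ∈ Finset.Icc 0 ((board.length : Int) - 1),
        ∑ j ∈ Finset.Icc 0 (pvL board i - 1), if i + j ≤ k then pvG board i j else 0)
        = ∑ i ∈ Finset.Icc 0 ((board.length : Int) - 1),
            ∑ j ∈ Finset.Icc 0 (M - 1),
              if j < pvL board i ∧ i + j ≤ k then pvG board i j else 0 := by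
      refine Finset.sum_congr rfl (fun i hi => ?_)
      rcases Finset.mem_Icc.mp hi with ⟨h0, h1⟩
      have hLM : pvL board i ≤ M := hMle i h0 (by omega)
      rw [sum_ite_filter, sum_ite_filter]
      refine Finset.sum_congr ?_ (fun _ _ => rfl)
      ext j
      simp only [Finset.mem_filter, Finset.mem_Icc]
      omega
    _ = ∑ d ∈ Finset.Icc 0 (min k ((board.length : Int) + M - 2)),
          ∑ i ∈ Finset.Icc 0 ((board.length : Int) - 1),
            if 0 ≤ d - i ∧ d - i < pvL board i then pvG board i (d - i) else 0 := by
      refine Eq.trans (Finset.sum_congr rfl (fun i hi => ?_)) Finset.sum_comm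
      rcases Finset.mem_Icc.mp hi with ⟨h0, h1⟩
      have hLM : pvL board i ≤ M := hMle i h0 (by omega)
      have hLi := hL0 i
      rw [sum_ite_filter, sum_ite_filter]
      refine Finset.sum_nbij' (fun j => j + i) (fun d => d - i) ?_ ?_ ?_ ?_ ?_
      · intro j hj
        simp only [Finset.mem_filter, Finset.mem_Icc] at hj ⊢
        omega
      · intro d hd
        simp only [Finset.mem_filter, Finset.mem_Icc] at hd ⊢
        omega
      · intro j _; change j + i - i = j; omega
      · intro d _; change d - i + i = d; omega
      · intro j _
        simp only [add_sub_cancel_right]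
    _ = ∑ d ∈ Finset.Icc 0 (min k ((board.length : Int) + M - 2)),
          ∑ i ∈ Finset.Icc (max 0 (d - M + 1)) (min d ((board.length : Int) - 1)),
            if d - i < pvL board i then pvG board i (d - i) else 0 := by
      refine Finset.sum_congr rfl (fun d hd => ?_)
      rw [sum_ite_filter, sum_ite_filter]
      refine Finset.sum_congr ?_ (fun _ _ => rfl)
      ext i
      simp only [Finset.mem_filter, Finset.mem_Icc]
      constructor
      · rintro ⟨⟨h0, h1⟩, h2, h3⟩
        have hLM := hMle i h0 (by omega)
        omega
      · rintro ⟨⟨h0, h1⟩, h2⟩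
        have h0' : 0 ≤ i := by omega
        have h1' : i ≤ (board.length : Int) - 1 := by omega
        have hLM := hMle i h0' (by omega)
        have hLi := hL0 i
        omega

theorem solution_spec : Claim_equal_solution := by
  intro board k _
  show solution board k = solution_alt board k
  rw [solution_eq_sum, solution_alt_eq_sum]
  refine key_sum board k _ (fun i h0 hn => ?_)
  have hmem : PySem.List.pyGetD board i [] ∈ board := by
    apply PySem.List.pyGetD_mem
    constructor <;> omega
  exact (le_foldl_len board 0).2 _ hmem
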